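-- pv_equiv track=rewrite | github.com/MrBrantCode/unitest_baseline | mut_generate/mist_train_taco/taco_6596/solution.py | find_smallest_subarray_size
-- ===== SOURCE A (Python) =====
-- def find_smallest_subarray_size(N, K, A):
--     class SegmentTree:
--         def __init__(self, arr, func=min, ie=2 ** 63):
--             self.h = (len(arr) - 1).bit_length()
--             self.n = 2 ** self.h
--             self.ie = ie
--             self.func = func
--             self.tree = [ie for _ in range(2 * self.n)]
--             for i in range(len(arr)):
--                 self.tree[self.n + i] = arr[i]
--             for i in range(1, self.n)[::-1]:
--                 self.tree[i] = func(self.tree[2 * i], self.tree[2 * i + 1])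
--
--         def set(self, idx, x):
--             idx += self.n
--             self.tree[idx] = x
--             while idx:
--                 idx >>= 1
--                 self.tree[idx] = self.func(self.tree[2 * idx], self.tree[2 * idx + 1])
--
--         def query(self, lt, rt):
--             lt += self.n
--             rt += self.n
--             vl = vr = self.ie
--             while rt - lt > 0:
--                 if lt & 1:
--                     vl = self.func(vl, self.tree[lt])
--                     lt += 1
--                 if rt & 1:
--                     rt -= 1
--                     vr = self.func(self.tree[rt], vr)
--                 lt >>= 1
--                 rt >>= 1
--             return self.func(vl, vr)
--
--     res = N + 1
--     st = SegmentTree([0] * K)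
--     rt = 0
--     for lt in range(N):
--         while rt < N and st.tree[1] == 0:
--             if A[rt] <= K:
--                 st.set(A[rt] - 1, st.query(A[rt] - 1, A[rt]) + 1)
--             rt += 1
--         if st.tree[1] != 0:
--             res = min(res, rt - lt)
--         if A[lt] <= K:
--             st.set(A[lt] - 1, st.query(A[lt] - 1, A[lt]) - 1)
--
--     return res if res <= N else 0
-- ===== SOURCE B (Python) =====
-- def find_smallest_subarray_size(N, K, A):
--     # Sliding window: a counter dict for the values 1..K plus a 'missing' count
--     # of values of 1..K absent from the window, instead of a min-segment-tree.
--     cnt = {}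
--     missing = K
--     rt = 0
--     res = N + 1
--     for lt in range(N):
--         while rt < N and missing > 0:
--             v = A[rt]
--             if 1 <= v <= K:
--                 c = cnt.get(v, 0)
--                 if c == 0:
--                     missing -= 1
--                 cnt[v] = c + 1
--             rt += 1
--         if missing == 0:
--             res = min(res, rt - lt)
--         v = A[lt]
--         if 1 <= v <= K:
--             c = cnt[v] - 1
--             cnt[v] = c
--             if c == 0:
--                 missing += 1
--     return res if res <= N else 0
-- ===== Notes on version B (the rewrite author's own statement) =====
-- stated objective: faster
-- what changed: Replaces the hand-rolled min-segment-tree over the K per-value counts (built, point-updated and queried with bit-shift loops) by a plain counter dict plus a single 'missing values' integer, so each window step is O(1) instead of O(log K) and the O(K) tree build disappears.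
-- outside the precondition, e.g. on find_smallest_subarray_size(2, -1, [1, 1]): A returns -1, B returns 0; on find_smallest_subarray_size(8, 4, [0, 3, -3, -1, 3, 3, 2, 5]): A returns 2, B returns 0; on find_smallest_subarray_size(3, 2, [1]): A raises IndexError, B raises IndexError
import Mathlib
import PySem

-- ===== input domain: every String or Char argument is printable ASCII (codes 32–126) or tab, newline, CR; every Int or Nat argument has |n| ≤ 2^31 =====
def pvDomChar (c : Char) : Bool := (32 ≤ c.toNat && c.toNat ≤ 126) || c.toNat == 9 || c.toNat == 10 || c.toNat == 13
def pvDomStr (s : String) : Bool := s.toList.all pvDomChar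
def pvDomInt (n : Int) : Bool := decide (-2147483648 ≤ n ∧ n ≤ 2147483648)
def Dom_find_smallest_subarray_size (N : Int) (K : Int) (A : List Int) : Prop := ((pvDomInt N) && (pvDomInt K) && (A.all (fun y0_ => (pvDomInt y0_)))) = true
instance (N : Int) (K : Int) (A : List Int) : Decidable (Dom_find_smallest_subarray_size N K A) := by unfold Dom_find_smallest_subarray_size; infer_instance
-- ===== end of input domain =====

-- B replaces A's min-segment-tree over the K value-counts by a counter dict plus a
-- 'missing values' integer: O(1) per window step instead of O(log K), no O(K) build.


-- ===== PORT A =====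
-- Python's `2 ** 63`, the segment tree's identity element `ie`.
def pvIE : Int := 9223372036854775808

-- `tree[i]` / `tree[i] = x`: Python list indexing, on an Array for O(1) access; on
-- every admitted input the index is nonnegative and in range, so these are exact.
def tget (t : Array Int) (i : Int) : Int := t.getD i.toNat 0
def tset (t : Array Int) (i : Int) (x : Int) : Array Int := t.setIfInBounds i.toNat x

-- `while idx: idx >>= 1; tree[idx] = min(tree[2*idx], tree[2*idx+1])` of SegmentTree.set.
-- Fuel 128 covers every nonnegative idx < 2^128 exactly; Python's loop diverges for
-- negative idx (reachable only outside Pre_).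
def stSetLoop : Nat → Int → Array Int → Array Int
  | 0, _, t => t
  | f + 1, idx, t =>
    if idx ≠ 0 then
      let idx' := PySem.Int.floordiv idx 2
      stSetLoop f idx' (tset t idx' (min (tget t (2 * idx')) (tget t (2 * idx' + 1))))
    else t

-- SegmentTree.set(idx, x) with func = min.
def stSet (n : Nat) (t : Array Int) (idx x : Int) : Array Int :=
  let i := idx + (n : Int)
  stSetLoop 128 i (tset t i x)

-- the body of SegmentTree.query's while loop (`lt & 1` = `lt % 2 == 1`, `>> 1` =
-- floor division by 2: exact for every Python int); fuel 128 covers every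
-- nonnegative lt, rt < 2^128 exactly.
def stQueryLoop : Nat → Int → Int → Int → Int → Array Int → Int
  | 0, _, _, vl, vr, _ => min vl vr
  | f + 1, lt, rt, vl, vr, t =>
    if rt - lt > 0 then
      let vl' := if PySem.Int.mod lt 2 = 1 then min vl (tget t lt) else vl
      let lt' := if PySem.Int.mod lt 2 = 1 then lt + 1 else lt
      let rt' := if PySem.Int.mod rt 2 = 1 then rt - 1 else rt
      let vr' := if PySem.Int.mod rt 2 = 1 then min (tget t rt') vr else vr
      stQueryLoop f (PySem.Int.floordiv lt' 2) (PySem.Int.floordiv rt' 2) vl' vr' t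
    else min vl vr

-- SegmentTree.query(lt, rt) with func = min, ie = 2**63.
def stQuery (n : Nat) (t : Array Int) (l r : Int) : Int :=
  stQueryLoop 128 (l + (n : Int)) (r + (n : Int)) pvIE pvIE t

-- SegmentTree.__init__([0] * K): h = (len(arr)-1).bit_length(), n = 2**h,
-- tree = [ie]*(2n); leaves, then internal nodes from range(1, n)[::-1].
-- ([0] * K is empty for K < 0, hence len(arr) = K.toNat.)
def stInit (K : Int) : Nat × Array Int :=
  let arr : Array Int := Array.replicate K.toNat 0
  let h := PySem.Int.bitLength ((arr.size : Int) - 1)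
  let n := 2 ^ h
  let t0 : Array Int := Array.replicate (2 * n) pvIE
  let t1 := (PySem.List.pyRange 0 (arr.size : Int) 1).foldl
      (fun t i => tset t ((n : Int) + i) (arr.getD i.toNat 0)) t0
  let t2 := ((PySem.List.pyRange 1 (n : Int) 1).reverse).foldl
      (fun t i => tset t i (min (tget t (2 * i)) (tget t (2 * i + 1)))) t1
  (n, t2)

-- `while rt < N and st.tree[1] == 0: …` of the main loop.
def aInner (N K : Int) (A : List Int) (n : Nat) (rt : Int) (t : Array Int) : Int × Array Int :=
  if h : rt < N ∧ tget t 1 = 0 then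
    let v := PySem.List.pyGetD A rt 0
    let t' := if v ≤ K then stSet n t (v - 1) (stQuery n t (v - 1) v + 1) else t
    aInner N K A n (rt + 1) t'
  else (rt, t)
termination_by (N - rt).toNat
decreasing_by omega

-- one iteration of `for lt in range(N)` in A
def aStep (N K : Int) (A : List Int) (n : Nat) (s : Array Int × Int × Int) (lt : Int) :
    Array Int × Int × Int :=
  let (t, rt, res) := s
  let (rt', t') := aInner N K A n rt t
  let res' := if tget t' 1 ≠ 0 then min res (rt' - lt) else res
  let v := PySem.List.pyGetD A lt 0
  let t'' := if v ≤ K then stSet n t' (v - 1) (stQuery n t' (v - 1) v - 1) else t'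
  (t'', rt', res')

def find_smallest_subarray_size (N : Int) (K : Int) (A : List Int) : Int :=
  let st := stInit K
  let fin := (PySem.List.pyRange 0 N 1).foldl (aStep N K A st.1) (st.2, 0, N + 1)
  if fin.2.2 ≤ N then fin.2.2 else 0

-- ===== PORT B =====
-- `while rt < N and missing > 0: …` of Source B.
def bInner (N K : Int) (A : List Int) (rt : Int) (cnt : PySem.Dict Int Int) (missing : Int) :
    Int × PySem.Dict Int Int × Int :=
  if h : rt < N ∧ missing > 0 then
    let v := PySem.List.pyGetD A rt 0
    let c := cnt.getD v 0
    let cnt' := if 1 ≤ v ∧ v ≤ K then cnt.insert v (c + 1) else cnt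
    let missing' := if 1 ≤ v ∧ v ≤ K then (if c = 0 then missing - 1 else missing) else missing
    bInner N K A (rt + 1) cnt' missing'
  else (rt, cnt, missing)
termination_by (N - rt).toNat
decreasing_by omega

-- one iteration of `for lt in range(N)` in B
def bStep (N K : Int) (A : List Int) (s : PySem.Dict Int Int × Int × Int × Int) (lt : Int) :
    PySem.Dict Int Int × Int × Int × Int :=
  let (cnt, missing, rt, res) := s
  let (rt', cnt', missing') := bInner N K A rt cnt missing
  let res' := if missing' = 0 then min res (rt' - lt) else res
  let v := PySem.List.pyGetD A lt 0
  if 1 ≤ v ∧ v ≤ K then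
    let c := cnt'.getD v 0 - 1
    (cnt'.insert v c, (if c = 0 then missing' + 1 else missing'), rt', res')
  else (cnt', missing', rt', res')

def find_smallest_subarray_size_alt (N : Int) (K : Int) (A : List Int) : Int :=
  let fin := (PySem.List.pyRange 0 N 1).foldl (bStep N K A) (PySem.Dict.empty, K, 0, N + 1)
  if fin.2.2.2 ≤ N then fin.2.2.2 else 0

-- ===== PRECONDITION & SPEC =====
-- Pre_ excludes (a) N > len(A), where A raises IndexError; (b) K < 0, where A returns a
-- negative 'size' no caller could want; (c) inputs whose first N elements contain a value
-- ≤ 0, where A's leaf index A[i]-1 wraps to the other end of the tree list, so A hangs,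
-- raises IndexError, or returns a value corrupted by writes into internal tree nodes.
def Pre_find_smallest_subarray_size (N : Int) (K : Int) (A : List Int) : Prop :=
  N ≤ (A.length : Int) ∧ 0 ≤ K ∧ ∀ x ∈ A.take N.toNat, 1 ≤ x
instance (N : Int) (K : Int) (A : List Int) : Decidable (Pre_find_smallest_subarray_size N K A) := by
  unfold Pre_find_smallest_subarray_size; infer_instance

def pvWitness_find_smallest_subarray_size : Int × Int × List Int := (3, 2, [1, 2, 1])

def Spec_find_smallest_subarray_size (N : Int) (K : Int) (A : List Int) (out : Int) : Prop := out = find_smallest_subarray_size_alt N K A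
instance (N : Int) (K : Int) (A : List Int) (out : Int) : Decidable (Spec_find_smallest_subarray_size N K A out) := by unfold Spec_find_smallest_subarray_size; infer_instance

-- ===== CLAIM (what is proved, stated in full; the proofs are below) =====
def Claim_equal_find_smallest_subarray_size : Prop := ∀ (N : Int) (K : Int) (A : List Int), Dom_find_smallest_subarray_size N K A → Pre_find_smallest_subarray_size N K A → Spec_find_smallest_subarray_size N K A (find_smallest_subarray_size N K A)

-- ===== LEMMAS AND PROOFS =====

def nodeVal (n : Nat) (leaf : Nat → Int) (j : Nat) : Int :=
  if h0 : j = 0 then 0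
  else if hn : n ≤ j then leaf (j - n)
  else min (nodeVal n leaf (2 * j)) (nodeVal n leaf (2 * j + 1))
termination_by 2 * n - j
decreasing_by all_goals omega

lemma nodeVal_leaf (n : Nat) (leaf : Nat → Int) (j : Nat) (h1 : 1 ≤ j) (h2 : n ≤ j) :
    nodeVal n leaf j = leaf (j - n) := by
  rw [nodeVal, dif_neg (by omega), dif_pos h2]

lemma nodeVal_node (n : Nat) (leaf : Nat → Int) (j : Nat) (h1 : 1 ≤ j) (h2 : j < n) :
    nodeVal n leaf j = min (nodeVal n leaf (2 * j)) (nodeVal n leaf (2 * j + 1)) := by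
  rw [nodeVal, dif_neg (by omega), dif_neg (by omega)]

lemma nodeVal_update (n : Nat) (leaf : Nat → Int) (i0 : Nat) (x : Int) :
    ∀ j, 1 ≤ j → (∀ m : Nat, (n + i0) / 2 ^ m ≠ j) →
      nodeVal n (Function.update leaf i0 x) j = nodeVal n leaf j := by
  have main : ∀ k j, 2 * n - j ≤ k → 1 ≤ j → (∀ m : Nat, (n + i0) / 2 ^ m ≠ j) →
      nodeVal n (Function.update leaf i0 x) j = nodeVal n leaf j := by
    intro k
    induction k with
    | zero =>
      intro j hk h1 hna
      -- 2*n ≤ j : leaf case with j ≥ n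
      have hn : n ≤ j := by omega
      rw [nodeVal_leaf _ _ _ h1 hn, nodeVal_leaf _ _ _ h1 hn]
      have : j - n ≠ i0 := by
        intro h; exact hna 0 (by simpa using by omega)
      simp [Function.update, this]
    | succ k ih =>
      intro j hk h1 hna
      by_cases hn : n ≤ j
      · rw [nodeVal_leaf _ _ _ h1 hn, nodeVal_leaf _ _ _ h1 hn]
        have : j - n ≠ i0 := by
          intro h; exact hna 0 (by simp; omega)
        simp [Function.update, this]
      · replace hn : j < n := by omega
        rw [nodeVal_node _ _ _ h1 hn, nodeVal_node _ _ _ h1 hn]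
        have hc1 : ∀ m : Nat, (n + i0) / 2 ^ m ≠ 2 * j := by
          intro m h
          exact hna (m + 1) (by rw [pow_succ, ← Nat.div_div_eq_div_mul, h]; omega)
        have hc2 : ∀ m : Nat, (n + i0) / 2 ^ m ≠ 2 * j + 1 := by
          intro m h
          exact hna (m + 1) (by rw [pow_succ, ← Nat.div_div_eq_div_mul, h]; omega)
        rw [ih (2 * j) (by omega) (by omega) hc1, ih (2 * j + 1) (by omega) (by omega) hc2]
  intro j h1 hna; exact main (2 * n - j) j le_rfl h1 hna

lemma nodeVal_lb (n : Nat) (leaf : Nat → Int) (c : Int) (hlb : ∀ i, c ≤ leaf i) :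
    ∀ j, 1 ≤ j → c ≤ nodeVal n leaf j := by
  have main : ∀ k j, 2 * n - j ≤ k → 1 ≤ j → c ≤ nodeVal n leaf j := by
    intro k
    induction k with
    | zero =>
      intro j hk h1
      rw [nodeVal_leaf _ _ _ h1 (by omega)]; exact hlb _
    | succ k ih =>
      intro j hk h1
      by_cases hn : n ≤ j
      · rw [nodeVal_leaf _ _ _ h1 hn]; exact hlb _
      · replace hn : j < n := by omega
        rw [nodeVal_node _ _ _ h1 hn]
        exact le_min (ih (2 * j) (by omega) (by omega)) (ih (2 * j + 1) (by omega) (by omega))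
  intro j h1; exact main (2 * n - j) j le_rfl h1

lemma nodeVal_le_leaf (n : Nat) (leaf : Nat → Int) (i : Nat) (hi : i < n) :
    ∀ m j, j ≠ 0 → (n + i) / 2 ^ m = j → nodeVal n leaf j ≤ leaf i := by
  intro m
  induction m with
  | zero =>
    intro j hj hij
    simp at hij
    subst hij
    rw [nodeVal_leaf _ _ _ (by omega) (by omega)]
    simp
  | succ m ih =>
    intro j hj hij
    set c := (n + i) / 2 ^ m with hc
    have hcj : c / 2 = j := by rw [hc, Nat.div_div_eq_div_mul, ← pow_succ]; exact hij
    have hcne : c ≠ 0 := by intro h; rw [h] at hcj; simp at hcj; omega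
    have hcle : c ≤ n + i := Nat.div_le_self _ _
    have hjn : j < n := by
      have h2 : (n + i) / 2 ^ (m + 1) ≤ (n + i) / 2 ^ 1 :=
        Nat.div_le_div_left (Nat.pow_le_pow_right (by norm_num) (by omega)) (by norm_num)
      have h3 : (n + i) / 2 ^ 1 < n := by
        rw [pow_one]; exact Nat.div_lt_of_lt_mul (by omega)
      omega
    have hcases : c = 2 * j ∨ c = 2 * j + 1 := by omega
    rw [nodeVal_node _ _ _ (by omega) hjn]
    rcases hcases with h | h
    · exact le_trans (min_le_left _ _) (h ▸ ih c hcne hc.symm)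
    · exact le_trans (min_le_right _ _) (h ▸ ih c hcne hc.symm)

lemma nodeVal_one_eq_zero_iff (h : Nat) (leaf : Nat → Int) (hlb : ∀ i, 0 ≤ leaf i)
    (hpad : ∀ i, 2 ^ h ≤ i → 1 ≤ leaf i) :
    (nodeVal (2 ^ h) leaf 1 = 0 ↔ ∃ i < 2 ^ h, leaf i = 0) := by
  constructor
  · intro h0
    by_contra hne
    push Not at hne
    have h1 : ∀ i, 1 ≤ leaf i := by
      intro i
      by_cases hi : i < 2 ^ h
      · have := hne i hi; have := hlb i; omega
      · exact hpad i (by omega)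
    have := nodeVal_lb (2 ^ h) leaf 1 h1 1 le_rfl
    omega
  · rintro ⟨i, hi, h0⟩
    have hdiv : (2 ^ h + i) / 2 ^ h = 1 := by
      rw [Nat.div_eq_iff (by positivity)]; omega
    have := nodeVal_le_leaf (2 ^ h) leaf i hi h 1 one_ne_zero hdiv
    have := nodeVal_lb (2 ^ h) leaf 0 hlb 1 le_rfl
    omega

def leafOf (Kn : Nat) (cnt : PySem.Dict Int Int) (i : Nat) : Int :=
  if i < Kn then cnt.getD ((i : Int) + 1) 0 else pvIE

def TreeInv (n : Nat) (leaf : Nat → Int) (t : Array Int) : Prop :=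
  t.size = 2 * n ∧ ∀ j, 1 ≤ j → j < 2 * n → t.getD j 0 = nodeVal n leaf j

lemma getD_set (t : Array Int) (i j : Nat) (v : Int) (hi : i < t.size) :
    (t.setIfInBounds i v).getD j 0 = if j = i then v else t.getD j 0 := by
  rcases eq_or_ne j i with rfl | hne
  · simp [Array.getD, Array.size_setIfInBounds, hi]
  · rw [if_neg hne]
    by_cases hj : j < t.size
    · simp [Array.getD, Array.size_setIfInBounds, hj, Array.getElem_setIfInBounds]
      intro h
      exact absurd h.symm hne
    · simp [Array.getD, Array.size_setIfInBounds, hj]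

lemma getD_replicate' (m j : Nat) (x : Int) : (Array.replicate m x).getD j 0 =
    if j < m then x else 0 := by
  by_cases hj : j < m
  · simp [Array.getD, hj]
  · simp [Array.getD, hj]

lemma tset_natCast (t : Array Int) (a : Nat) (v : Int) :
    tset t (a : Int) v = t.setIfInBounds a v := by
  unfold tset; simp

lemma tget_natCast (t : Array Int) (a : Nat) : tget t (a : Int) = t.getD a 0 := by
  unfold tget; simp

lemma leaves_fold (Kn n : Nat) (hK : Kn ≤ n) : ∀ m, m ≤ Kn →
    ((PySem.List.pyRange 0 (m : Int) 1).foldl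
        (fun t i => tset t ((n : Int) + i) ((Array.replicate Kn (0 : Int)).getD i.toNat 0))
        (Array.replicate (2 * n) pvIE)).size = 2 * n ∧
    ∀ j, j < 2 * n →
      ((PySem.List.pyRange 0 (m : Int) 1).foldl
        (fun t i => tset t ((n : Int) + i) ((Array.replicate Kn (0 : Int)).getD i.toNat 0))
        (Array.replicate (2 * n) pvIE)).getD j 0 = if n ≤ j ∧ j < n + m then 0 else pvIE := by
  intro m
  induction m with
  | zero =>
    intro _
    rw [show ((0 : Nat) : Int) = 0 from rfl, PySem.List.pyRange_one_eq_nil le_rfl]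
    constructor
    · simp
    · intro j hj
      simp only [List.foldl_nil]
      rw [if_neg (by omega), getD_replicate']
      simp [hj]
  | succ m ih =>
    intro hm
    obtain ⟨ihl, ihd⟩ := ih (by omega)
    rw [show ((m + 1 : Nat) : Int) = (m : Int) + 1 by push_cast; ring,
        PySem.List.pyRange_one_succ_right (by positivity), List.foldl_append]
    simp only [List.foldl_cons, List.foldl_nil]
    have harr : (Array.replicate Kn (0 : Int)).getD ((m : Int)).toNat 0 = 0 := by
      rw [getD_replicate']
      simp
    have hcast : (n : Int) + (m : Int) = ((n + m : Nat) : Int) := by push_cast; ring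
    rw [harr, hcast, tset_natCast]
    refine ⟨by simpa using ihl, ?_⟩
    intro j hj
    rw [getD_set _ _ _ _ (by omega), ihd j hj]
    split_ifs <;> omega

lemma internal_fold (n : Nat) (leaf : Nat → Int) : ∀ m, m ≤ n →
    ∀ t : Array Int, t.size = 2 * n →
    (∀ j, 1 ≤ j → j < 2 * n → t.getD j 0 = if m ≤ j then nodeVal n leaf j else pvIE) →
    TreeInv n leaf (((PySem.List.pyRange 1 (m : Int) 1).reverse).foldl
        (fun t i => tset t i (min (tget t (2 * i)) (tget t (2 * i + 1)))) t) := by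
  intro m
  induction m with
  | zero =>
    intro _ t hl hd
    rw [show ((0 : Nat) : Int) = 0 from rfl, PySem.List.pyRange_one_eq_nil (by norm_num)]
    refine ⟨hl, fun j h1 h2 => ?_⟩
    have := hd j h1 h2
    simpa [Nat.one_le_iff_ne_zero.mp h1] using this
  | succ m ih =>
    intro hm t hl hd
    rcases Nat.eq_zero_or_pos m with rfl | hmpos
    · -- pyRange 1 1 1 = []
      rw [show ((0 + 1 : Nat) : Int) = 1 from rfl, PySem.List.pyRange_one_eq_nil le_rfl]
      refine ⟨hl, fun j h1 h2 => ?_⟩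
      have := hd j h1 h2
      simpa [h1] using this
    · rw [show ((m + 1 : Nat) : Int) = (m : Int) + 1 by push_cast; ring,
          PySem.List.pyRange_one_succ_right (by exact_mod_cast hmpos), List.reverse_append]
      simp only [List.reverse_cons, List.reverse_nil, List.nil_append, List.singleton_append,
        List.foldl_cons]
      apply ih (by omega)
      · rw [tset_natCast]; simpa using hl
      · intro j h1 h2
        have h2m : (2 * (m : Int)) = ((2 * m : Nat) : Int) := by push_cast; ring
        have h2m1 : (2 * (m : Int) + 1) = ((2 * m + 1 : Nat) : Int) := by push_cast; ring
        rw [h2m1, h2m, tget_natCast, tget_natCast, tset_natCast, getD_set _ _ _ _ (by omega)]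
        by_cases hje : j = m
        · subst hje
          rw [if_pos rfl, if_pos le_rfl, nodeVal_node n leaf j h1 (by omega),
              hd (2 * j) (by omega) (by omega), hd (2 * j + 1) (by omega) (by omega),
              if_pos (by omega), if_pos (by omega)]
        · rw [if_neg hje, hd j h1 h2]
          by_cases hmj : m + 1 ≤ j
          · rw [if_pos hmj, if_pos (by omega)]
          · rw [if_neg hmj, if_neg (by omega)]

lemma Kn_le_pow (Kn : Nat) : Kn ≤ 2 ^ PySem.Int.bitLength ((Kn : Int) - 1) := by
  rcases Nat.eq_zero_or_pos Kn with h0 | hpos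
  · simp [h0]
  · have hc : ((Kn : Int) - 1) = ((Kn - 1 : Nat) : Int) := by push_cast [hpos]; ring
    rw [hc]
    have := PySem.Int.lt_two_pow_bitLength ((Kn - 1 : Nat) : Int)
    simp only [Int.natAbs_natCast] at this
    omega

lemma stInit_spec (K : Int) (_hK0 : 0 ≤ K) :
    (stInit K).1 = 2 ^ PySem.Int.bitLength ((K.toNat : Int) - 1) ∧
    K.toNat ≤ (stInit K).1 ∧
    TreeInv (stInit K).1 (leafOf K.toNat PySem.Dict.empty) (stInit K).2 := by
  have hfst : (stInit K).1 = 2 ^ PySem.Int.bitLength ((K.toNat : Int) - 1) := by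
    simp [stInit]
  refine ⟨hfst, by rw [hfst]; exact Kn_le_pow K.toNat, ?_⟩
  rw [hfst]
  set Kn := K.toNat with hKn
  set n := 2 ^ PySem.Int.bitLength ((Kn : Int) - 1) with hn
  have hKle : Kn ≤ n := Kn_le_pow Kn
  have hsnd : (stInit K).2 =
      ((PySem.List.pyRange 1 (n : Int) 1).reverse).foldl
        (fun t i => tset t i (min (tget t (2 * i)) (tget t (2 * i + 1))))
        ((PySem.List.pyRange 0 (Kn : Int) 1).foldl
          (fun t i => tset t ((n : Int) + i) ((Array.replicate Kn (0 : Int)).getD i.toNat 0))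
          (Array.replicate (2 * n) pvIE)) := by
    simp [stInit, ← hKn, ← hn]
  rw [hsnd]
  obtain ⟨l1, l2⟩ := leaves_fold Kn n hKle Kn le_rfl
  apply internal_fold n _ n le_rfl _ l1
  intro j h1 h2
  rw [l2 j h2]
  by_cases hnj : n ≤ j
  · rw [if_pos hnj, nodeVal_leaf _ _ _ h1 hnj]
    unfold leafOf
    by_cases hk : j - n < Kn
    · rw [if_pos ⟨hnj, by omega⟩, if_pos hk, PySem.Dict.getD_empty]
    · rw [if_neg (by omega), if_neg hk]
  · rw [if_neg (by omega), if_neg hnj]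

lemma stSetLoop_inv (n : Nat) (leaf : Nat → Int) :
    ∀ (f q : Nat) (t : Array Int), q < 2 ^ f → q < 2 * n → t.size = 2 * n →
    (∀ j, 1 ≤ j → j < 2 * n → (∀ m, 1 ≤ m → q / 2 ^ m ≠ j) → t.getD j 0 = nodeVal n leaf j) →
    (stSetLoop f (q : Int) t).size = 2 * n ∧
      ∀ j, 1 ≤ j → j < 2 * n → (stSetLoop f (q : Int) t).getD j 0 = nodeVal n leaf j := by
  intro f
  induction f with
  | zero =>
    intro q t hqf hq2n hl hd
    have hq : q = 0 := by omega
    subst hq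
    exact ⟨hl, fun j h1 h2 => hd j h1 h2 (fun m hm => by simp [Nat.zero_div]; omega)⟩
  | succ f ih =>
    intro q t hqf hq2n hl hd
    rcases Nat.eq_zero_or_pos q with hq | hq
    · subst hq
      simp only [stSetLoop, Nat.cast_zero, ne_eq, not_true_eq_false, if_false]
      exact ⟨hl, fun j h1 h2 => hd j h1 h2 (fun m hm => by simp [Nat.zero_div]; omega)⟩
    · have hne : ((q : Nat) : Int) ≠ 0 := by exact_mod_cast Nat.pos_iff_ne_zero.mp hq
      have hfd : PySem.Int.floordiv ((q : Nat) : Int) 2 = ((q / 2 : Nat) : Int) := by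
        exact_mod_cast PySem.Int.floordiv_natCast q 2
      have hstep : stSetLoop (f + 1) ((q : Nat) : Int) t =
          stSetLoop f ((q / 2 : Nat) : Int)
            (tset t ((q / 2 : Nat) : Int)
              (min (tget t (2 * ((q / 2 : Nat) : Int))) (tget t (2 * ((q / 2 : Nat) : Int) + 1)))) := by
        simp only [stSetLoop, hne, ne_eq, not_false_eq_true, if_true, hfd]
      rw [hstep]
      have h2c : (2 * ((q / 2 : Nat) : Int)) = ((2 * (q / 2) : Nat) : Int) := by push_cast; ring
      have h2c1 : (2 * ((q / 2 : Nat) : Int) + 1) = ((2 * (q / 2) + 1 : Nat) : Int) := by push_cast; ring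
      rw [h2c1, h2c, tget_natCast, tget_natCast, tset_natCast]
      have hdivle : ∀ m, 1 ≤ m → q / 2 ^ m ≤ q / 2 := by
        intro m hm
        calc q / 2 ^ m ≤ q / 2 ^ 1 :=
              Nat.div_le_div_left (Nat.pow_le_pow_right (by norm_num) hm) (by positivity)
          _ = q / 2 := by norm_num
      apply ih (q / 2)
      · have h2f : 2 ^ (f + 1) = 2 ^ f * 2 := by rw [pow_succ]
        omega
      · omega
      · simpa using hl
      · intro j h1 h2 hna
        by_cases hj : j = q / 2
        · subst hj
          rw [getD_set _ _ _ _ (by omega), if_pos rfl]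
          rw [nodeVal_node _ _ _ h1 (by omega)]
          have hc1 := hd (2 * (q / 2)) (by omega) (by omega) (fun m hm => by
            have := hdivle m hm; omega)
          have hc2 := hd (2 * (q / 2) + 1) (by omega) (by omega) (fun m hm => by
            have := hdivle m hm; omega)
          rw [hc1, hc2]
        · rw [getD_set _ _ _ _ (by omega), if_neg hj]
          apply hd j h1 h2
          intro m hm
          rcases m with _ | m'
          · omega
          · rcases Nat.eq_zero_or_pos m' with hm' | hm'
            · subst hm'
              simpa using fun h => hj h.symm
            · have : q / 2 ^ (m' + 1) = (q / 2) / 2 ^ m' := by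
                rw [Nat.div_div_eq_div_mul, ← pow_succ']
              rw [this]
              exact hna m' hm'

lemma stSet_inv (n : Nat) (leaf : Nat → Int) (t : Array Int) (i : Nat) (x : Int)
    (hInv : TreeInv n leaf t) (hi : i < n) (hpow : n + i < 2 ^ 128) :
    TreeInv n (Function.update leaf i x) (stSet n t (i : Int) x) := by
  obtain ⟨hl, hd⟩ := hInv
  rw [show stSet n t ((i : Nat) : Int) x =
      stSetLoop 128 ((n + i : Nat) : Int) (tset t ((n + i : Nat) : Int) x) by
    simp only [stSet]; rw [Nat.cast_add]; ring_nf]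
  rw [tset_natCast]
  have hcond : ∀ j, 1 ≤ j → j < 2 * n →
      (∀ m, 1 ≤ m → (n + i) / 2 ^ m ≠ j) →
      (t.setIfInBounds (n + i) x).getD j 0 = nodeVal n (Function.update leaf i x) j := by
    intro j h1 h2 hna
    by_cases hj : j = n + i
    · subst hj
      rw [getD_set _ _ _ _ (by omega), if_pos rfl,
          nodeVal_leaf _ _ _ h1 (by omega)]
      simp [Function.update]
    · rw [getD_set _ _ _ _ (by omega), if_neg hj,
          nodeVal_update n leaf i x j h1 (fun m => ?_)]
      · exact hd j h1 h2
      · rcases Nat.eq_zero_or_pos m with hm | hm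
        · subst hm; simpa using fun h => hj h.symm
        · exact hna m hm
  exact And.intro (stSetLoop_inv n _ 128 (n + i) _ hpow (by omega) (by simpa using hl) hcond).1
    (stSetLoop_inv n _ 128 (n + i) _ hpow (by omega) (by simpa using hl) hcond).2

lemma stQuery_leaf (n : Nat) (t : Array Int) (i : Nat)
    (hle : t.getD (n + i) 0 ≤ pvIE) :
    stQuery n t ((i : Nat) : Int) (((i : Nat) : Int) + 1) = t.getD (n + i) 0 := by
  unfold stQuery
  have hca : ((i : Nat) : Int) + (n : Int) = ((n + i : Nat) : Int) := by push_cast; ring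
  have hcb : ((i : Nat) : Int) + 1 + (n : Int) = ((n + i : Nat) : Int) + 1 := by push_cast; ring
  rw [hca, hcb]
  set a := n + i with hadef
  have hmoda : PySem.Int.mod ((a : Nat) : Int) 2 = ((a % 2 : Nat) : Int) := by
    exact_mod_cast PySem.Int.mod_natCast a 2
  have hmodb : PySem.Int.mod (((a : Nat) : Int) + 1) 2 = (((a + 1) % 2 : Nat) : Int) := by
    rw [show ((a : Nat) : Int) + 1 = (((a + 1 : Nat)) : Int) by push_cast; ring]
    exact_mod_cast PySem.Int.mod_natCast (a + 1) 2
  rcases Nat.mod_two_eq_zero_or_one a with ha | ha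
  · -- a even, a+1 odd
    have h1 : ¬ (PySem.Int.mod ((a : Nat) : Int) 2 = 1) := by rw [hmoda, ha]; norm_num
    have h2 : PySem.Int.mod (((a : Nat) : Int) + 1) 2 = 1 := by
      rw [hmodb, Nat.add_mod, ha]; norm_num
    rw [show (128 : Nat) = 127 + 1 from rfl, stQueryLoop]
    rw [if_pos (by omega)]
    simp only [if_neg h1, if_pos h2]
    have he : ((a : Nat) : Int) + 1 - 1 = ((a : Nat) : Int) := by ring
    rw [he, tget_natCast]
    rw [show (127 : Nat) = 126 + 1 from rfl, stQueryLoop]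
    rw [if_neg (by omega)]
    omega
  · -- a odd, a+1 even
    have h1 : PySem.Int.mod ((a : Nat) : Int) 2 = 1 := by rw [hmoda, ha]; norm_num
    have h2 : ¬ (PySem.Int.mod (((a : Nat) : Int) + 1) 2 = 1) := by
      rw [hmodb, Nat.add_mod, ha]; norm_num
    rw [show (128 : Nat) = 127 + 1 from rfl, stQueryLoop]
    rw [if_pos (by omega)]
    simp only [if_pos h1, if_neg h2]
    rw [tget_natCast]
    rw [show (127 : Nat) = 126 + 1 from rfl, stQueryLoop]
    rw [if_neg (by omega)]
    omega

-- zCount: how many of the values 1..Kn have count 0 in cnt (B's `missing`)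
def zCount (Kn : Nat) (cnt : PySem.Dict Int Int) : Nat :=
  (List.range Kn).countP (fun (i : Nat) => decide (cnt.getD ((i : Int) + 1) 0 = 0))

lemma countP_nodup_update (p p' : Nat → Bool) (i0 : Nat) :
    ∀ l : List Nat, l.Nodup → i0 ∈ l → (∀ i ∈ l, i ≠ i0 → p' i = p i) →
    (l.countP p' : Int) = (l.countP p : Int) +
      (if p' i0 then 1 else 0) - (if p i0 then 1 else 0) := by
  intro l
  induction l with
  | nil => intro _ h; simp at h
  | cons a l ih =>
    intro hnd hmem hagree
    have hnotin : a ∉ l := (List.nodup_cons.mp hnd).1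
    rw [List.countP_cons, List.countP_cons]
    by_cases hai : a = i0
    · subst hai
      have hc : l.countP p' = l.countP p :=
        List.countP_congr (fun i hi => by
          rw [hagree i (List.mem_cons_of_mem _ hi) (fun h => hnotin (h ▸ hi))])
      rw [hc]
      push_cast
      split_ifs <;> omega
    · have hmem' : i0 ∈ l := by
        rcases List.mem_cons.mp hmem with h | h
        · exact absurd h.symm hai
        · exact h
      rw [hagree a (List.mem_cons_self) hai]
      have hrec := ih (List.nodup_cons.mp hnd).2 hmem'
        (fun i hi => hagree i (List.mem_cons_of_mem _ hi))
      push_cast at hrec ⊢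
      split_ifs at hrec ⊢ <;> omega

lemma zCount_insert (Kn : Nat) (cnt : PySem.Dict Int Int) (v x : Int)
    (hv : 1 ≤ v) (hvK : v ≤ (Kn : Int)) :
    (zCount Kn (cnt.insert v x) : Int) = (zCount Kn cnt : Int) +
      (if x = 0 then 1 else 0) - (if cnt.getD v 0 = 0 then 1 else 0) := by
  have hi0 : (((v - 1).toNat : Nat) : Int) + 1 = v := by omega
  have hi0K : (v - 1).toNat < Kn := by omega
  unfold zCount
  rw [countP_nodup_update
      (fun (i : Nat) => decide (cnt.getD ((i : Int) + 1) 0 = 0))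
      (fun (i : Nat) => decide ((cnt.insert v x).getD ((i : Int) + 1) 0 = 0))
      (v - 1).toNat (List.range Kn) (List.nodup_range)
      (List.mem_range.mpr hi0K) ?agree]
  case agree =>
    intro i _ hne
    have hiv : ((i : Int) + 1) ≠ v := by omega
    simp [PySem.Dict.getD_insert, hiv]
  simp only [PySem.Dict.getD_insert, hi0]
  simp [hi0]

lemma zCount_pos_iff (Kn : Nat) (cnt : PySem.Dict Int Int) :
    0 < zCount Kn cnt ↔ ∃ i < Kn, cnt.getD ((i : Int) + 1) 0 = 0 := by
  unfold zCount
  rw [List.countP_pos_iff]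
  constructor
  · rintro ⟨i, hi, hp⟩
    exact ⟨i, List.mem_range.mp hi, by simpa using hp⟩
  · rintro ⟨i, hi, hp⟩
    exact ⟨i, List.mem_range.mpr hi, by simpa using hp⟩

-- winCount: the count of v in the window A[lo:hi]
def winCount (A : List Int) (lo hi : Nat) (v : Int) : Nat := ((A.take hi).drop lo).count v

lemma winCount_zero (A : List Int) (lo : Nat) (v : Int) : winCount A lo lo v = 0 := by
  unfold winCount
  rw [List.drop_eq_nil_of_le (by simp), List.count_nil]

lemma winCount_le (A : List Int) (lo hi : Nat) (v : Int) : winCount A lo hi v ≤ hi - lo := by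
  unfold winCount
  calc ((A.take hi).drop lo).count v ≤ ((A.take hi).drop lo).length := List.count_le_length
    _ ≤ hi - lo := by simp [List.length_drop, List.length_take]; omega

lemma winCount_extend (A : List Int) (lo hi : Nat) (v : Int) (hlo : lo ≤ hi)
    (hhi : hi < A.length) :
    winCount A lo (hi + 1) v = winCount A lo hi v + if A[hi] = v then 1 else 0 := by
  unfold winCount
  rw [List.take_succ, List.getElem?_eq_getElem hhi]
  rw [List.drop_append_of_le_length (by simp; omega), List.count_append]
  by_cases h : A[hi] = v
  · simp [h]
  · simp [h]

lemma winCount_shift (A : List Int) (lo hi : Nat) (v : Int) (hlt : lo < hi)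
    (hhi : hi ≤ A.length) :
    winCount A lo hi v = (if A[lo]'(by omega) = v then 1 else 0) + winCount A (lo + 1) hi v := by
  unfold winCount
  rw [List.drop_eq_getElem_cons (by simp; omega), List.count_cons]
  rw [List.getElem_take]
  by_cases h : A[lo]'(by omega) = v
  · simp [h]; omega
  · simp [h]

-- the coupling between A's segment-tree state and B's (cnt, missing) state
def SimInv (K : Int) (A : List Int) (n Kn lo hi : Nat)
    (t : Array Int) (cnt : PySem.Dict Int Int) (missing : Int) : Prop :=
  TreeInv n (leafOf Kn cnt) t ∧
  missing = (zCount Kn cnt : Int) ∧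
  (∀ v : Int, 1 ≤ v → v ≤ K → cnt.getD v 0 = (winCount A lo hi v : Int)) ∧
  (1 ≤ Kn → lo ≤ hi)

lemma leafOf_nonneg (K : Int) (A : List Int) (Kn lo hi : Nat) (cnt : PySem.Dict Int Int)
    (hKn : Kn = K.toNat) (_hK0 : 0 ≤ K)
    (hwin : ∀ v : Int, 1 ≤ v → v ≤ K → cnt.getD v 0 = (winCount A lo hi v : Int)) :
    ∀ i, 0 ≤ leafOf Kn cnt i := by
  intro i
  unfold leafOf
  split_ifs with hi
  · rw [hwin ((i : Int) + 1) (by omega) (by omega)]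
    exact Int.natCast_nonneg _
  · unfold pvIE; norm_num

lemma cond_equiv (K : Int) (A : List Int) (H n Kn lo hi : Nat) (t : Array Int)
    (cnt : PySem.Dict Int Int) (missing : Int)
    (hn : n = 2 ^ H) (hKn : Kn = K.toNat) (hK0 : 0 ≤ K) (hKle : Kn ≤ n)
    (hSim : SimInv K A n Kn lo hi t cnt missing) :
    (tget t 1 = 0 ↔ missing > 0) := by
  obtain ⟨⟨hlen, hval⟩, hmiss, hwin, _⟩ := hSim
  subst hn
  have h1 : tget t 1 = t.getD 1 0 := by
    rw [show (1 : Int) = ((1 : Nat) : Int) from rfl, tget_natCast]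
  have hn1 : 1 ≤ 2 ^ H := Nat.one_le_two_pow
  rw [h1, hval 1 le_rfl (by omega)]
  have hlb := leafOf_nonneg K A Kn lo hi cnt hKn hK0 hwin
  have hiff := nodeVal_one_eq_zero_iff H (leafOf Kn cnt) hlb (fun i hi => by
    unfold leafOf
    rw [if_neg (by omega)]
    unfold pvIE; norm_num)
  constructor
  · intro h0
    obtain ⟨i, hi, hz⟩ := hiff.mp h0
    have hiK : i < Kn := by
      by_contra hiK
      unfold leafOf at hz
      rw [if_neg hiK] at hz
      exact absurd hz (by unfold pvIE; norm_num)
    rw [hmiss]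
    have : 0 < zCount Kn cnt := (zCount_pos_iff Kn cnt).mpr ⟨i, hiK, by
      unfold leafOf at hz; rwa [if_pos hiK] at hz⟩
    omega
  · intro hpos
    rw [hmiss] at hpos
    obtain ⟨i, hiK, hz⟩ := (zCount_pos_iff Kn cnt).mp (by omega)
    exact hiff.mpr ⟨i, by omega, by unfold leafOf; rwa [if_pos hiK]⟩

lemma aInner_step (N K : Int) (A : List Int) (n : Nat) (rt : Int) (t : Array Int)
    (hcond : rt < N ∧ tget t 1 = 0) :
    aInner N K A n rt t = aInner N K A n (rt + 1)
      (if PySem.List.pyGetD A rt 0 ≤ K then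
        stSet n t (PySem.List.pyGetD A rt 0 - 1)
          (stQuery n t (PySem.List.pyGetD A rt 0 - 1) (PySem.List.pyGetD A rt 0) + 1)
      else t) := by
  rw [aInner, dif_pos hcond]

lemma aInner_exit (N K : Int) (A : List Int) (n : Nat) (rt : Int) (t : Array Int)
    (hcond : ¬ (rt < N ∧ tget t 1 = 0)) :
    aInner N K A n rt t = (rt, t) := by
  rw [aInner, dif_neg hcond]

lemma bInner_step (N K : Int) (A : List Int) (rt : Int) (cnt : PySem.Dict Int Int)
    (missing : Int) (hcond : rt < N ∧ missing > 0) :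
    bInner N K A rt cnt missing = bInner N K A (rt + 1)
      (if 1 ≤ PySem.List.pyGetD A rt 0 ∧ PySem.List.pyGetD A rt 0 ≤ K then
        cnt.insert (PySem.List.pyGetD A rt 0) (cnt.getD (PySem.List.pyGetD A rt 0) 0 + 1)
      else cnt)
      (if 1 ≤ PySem.List.pyGetD A rt 0 ∧ PySem.List.pyGetD A rt 0 ≤ K then
        (if cnt.getD (PySem.List.pyGetD A rt 0) 0 = 0 then missing - 1 else missing)
      else missing) := by
  rw [bInner, dif_pos hcond]

lemma bInner_exit (N K : Int) (A : List Int) (rt : Int) (cnt : PySem.Dict Int Int)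
    (missing : Int) (hcond : ¬ (rt < N ∧ missing > 0)) :
    bInner N K A rt cnt missing = (rt, cnt, missing) := by
  rw [bInner, dif_neg hcond]

lemma pvIE_big : (2147483649 : Int) ≤ pvIE := by unfold pvIE; norm_num

lemma leafOf_insert (Kn : Nat) (cnt : PySem.Dict Int Int) (v x : Int)
    (hv : 1 ≤ v) (hvK : v ≤ (Kn : Int)) :
    leafOf Kn (cnt.insert v x) = Function.update (leafOf Kn cnt) (v - 1).toNat x := by
  funext i
  rw [Function.update_apply]
  unfold leafOf
  by_cases hi : i = (v - 1).toNat
  · subst hi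
    rw [if_pos (by omega), if_pos rfl, PySem.Dict.getD_insert, if_pos (by omega)]
  · rw [if_neg hi]
    by_cases hiK : i < Kn
    · rw [if_pos hiK, if_pos hiK, PySem.Dict.getD_insert, if_neg (by omega)]
    · rw [if_neg hiK, if_neg hiK]

lemma inner_sim (N K : Int) (A : List Int) (H n Kn lo : Nat)
    (hn : n = 2 ^ H) (hKn : Kn = K.toNat) (hK0 : 0 ≤ K) (hKle : Kn ≤ n)
    (hn31 : n ≤ 2 ^ 31) (hN31 : N ≤ 2147483648) (hN0 : 0 < N)
    (hNlen : N ≤ (A.length : Int))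
    (hpre : ∀ x ∈ A.take N.toNat, 1 ≤ x) :
    ∀ (d hi : Nat) (t : Array Int) (cnt : PySem.Dict Int Int) (missing : Int),
      N.toNat - hi ≤ d → hi ≤ N.toNat →
      SimInv K A n Kn lo hi t cnt missing →
      ∃ (hi' : Nat) (t' : Array Int) (cnt' : PySem.Dict Int Int) (missing' : Int),
        aInner N K A n (hi : Int) t = ((hi' : Int), t') ∧
        bInner N K A (hi : Int) cnt missing = ((hi' : Int), cnt', missing') ∧
        hi ≤ hi' ∧ hi' ≤ N.toNat ∧
        SimInv K A n Kn lo hi' t' cnt' missing' ∧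
        (missing' = 0 ∨ (hi' : Int) = N) := by
  intro d
  induction d with
  | zero =>
    intro hi t cnt missing hd hhi hSim
    have hhieq : hi = N.toNat := by omega
    have hnotlt : ¬ ((hi : Int) < N) := by omega
    refine ⟨hi, t, cnt, missing,
      aInner_exit _ _ _ _ _ _ (fun h => hnotlt h.1),
      bInner_exit _ _ _ _ _ _ (fun h => hnotlt h.1),
      le_rfl, hhi, hSim, Or.inr (by omega)⟩
  | succ d ih =>
    intro hi t cnt missing hd hhi hSim
    have hca := cond_equiv K A H n Kn lo hi t cnt missing hn hKn hK0 hKle hSim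
    obtain ⟨hTree, hmiss, hwin, hlohi⟩ := hSim
    by_cases hc : (hi : Int) < N ∧ missing > 0
    · -- both loops advance
      have hhiN : hi < N.toNat := by omega
      have hhilen : hi < A.length := by omega
      set v := PySem.List.pyGetD A (hi : Int) 0 with hvdef
      have hvA : v = A[hi] := by
        rw [hvdef, PySem.List.pyGetD_natCast, List.getD_eq_getElem _ _ hhilen]
      have hv1 : 1 ≤ v := by
        rw [hvA]
        exact hpre _ (by
          have : A[hi] = (A.take N.toNat)[hi]'(by simp; omega) := (List.getElem_take).symm
          rw [this]
          exact List.getElem_mem _)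
      -- Kn ≥ 1 and lo ≤ hi in the advancing case
      have hKn1 : 1 ≤ Kn := by
        rcases Nat.eq_zero_or_pos Kn with h0 | h1
        · exfalso
          have : missing = 0 := by rw [hmiss, h0]; simp [zCount]
          omega
        · exact h1
      have hlohi' : lo ≤ hi := hlohi hKn1
      have hstepA := aInner_step N K A n (hi : Int) t ⟨hc.1, hca.mpr hc.2⟩
      have hstepB := bInner_step N K A (hi : Int) cnt missing hc
      rw [← hvdef] at hstepA hstepB
      have hcast1 : (hi : Int) + 1 = ((hi + 1 : Nat) : Int) := by push_cast; ring
      rw [hcast1] at hstepA hstepB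
      by_cases hvK : v ≤ K
      · -- the element is one of the tracked values 1..K
        set i0 := (v - 1).toNat with hi0def
        have hi0K : i0 < Kn := by omega
        have hvi0 : v - 1 = (i0 : Int) := by omega
        have hvi01 : v = ((i0 : Nat) : Int) + 1 := by omega
        set c := cnt.getD v 0 with hcdef
        have hcw : c = (winCount A lo hi v : Int) := hwin v hv1 hvK
        have hcbound : c ≤ pvIE := by
          have h1 := winCount_le A lo hi v
          have h2 := pvIE_big
          omega
        have hleafval : t.getD (n + i0) 0 = c := by
          rw [hTree.2 (n + i0) (by omega) (by omega),
              nodeVal_leaf _ _ _ (by omega) (by omega)]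
          unfold leafOf
          rw [Nat.add_sub_cancel_left, if_pos hi0K, ← hvi01]
        have hquery : stQuery n t (v - 1) v = c := by
          rw [hvi0, hvi01, stQuery_leaf n t i0 (by rw [hleafval]; exact hcbound)]
          exact hleafval
        have hSim' : SimInv K A n Kn lo (hi + 1)
            (stSet n t (v - 1) (c + 1)) (cnt.insert v (c + 1))
            (if c = 0 then missing - 1 else missing) := by
          refine ⟨?_, ?_, ?_, fun _ => by omega⟩
          · rw [leafOf_insert Kn cnt v (c + 1) hv1 (by omega), ← hi0def, hvi0]
            exact stSet_inv n _ t i0 (c + 1) hTree (by omega) (by omega)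
          · have hz := zCount_insert Kn cnt v (c + 1) hv1 (by omega)
            have hc1 : ¬ (c + 1 = 0) := by
              have := winCount_le A lo hi v; omega
            rw [if_neg hc1, ← hcdef] at hz
            rw [hmiss]
            split_ifs with h0
            · rw [if_pos h0] at hz; omega
            · rw [if_neg h0] at hz; omega
          · intro w hw1 hwK
            rw [PySem.Dict.getD_insert,
                winCount_extend A lo hi w hlohi' hhilen]
            by_cases hwv : w = v
            · rw [if_pos hwv, hwv, if_pos (show A[hi] = v from hvA.symm)]
              push_cast
              omega
            · rw [if_neg hwv,
                  if_neg (show ¬ A[hi] = w from fun h => by omega)]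
              simp [hwin w hw1 hwK]
        rw [if_pos hvK, hquery] at hstepA
        rw [if_pos ⟨hv1, hvK⟩, if_pos ⟨hv1, hvK⟩] at hstepB
        rw [hstepA, hstepB]
        obtain ⟨hi', t', cnt', missing', ha, hb, h1, h2, h3, h4⟩ :=
          ih (hi + 1) _ _ _ (by omega) (by omega) hSim'
        exact ⟨hi', t', cnt', missing', ha, hb, by omega, h2, h3, h4⟩
      · -- the element is > K: both sides leave their state unchanged
        have hSim' : SimInv K A n Kn lo (hi + 1) t cnt missing := by
          refine ⟨hTree, hmiss, ?_, fun _ => by omega⟩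
          intro w hw1 hwK
          rw [winCount_extend A lo hi w hlohi' hhilen,
              if_neg (show ¬ A[hi] = w from fun h => by omega)]
          simp [hwin w hw1 hwK]
        rw [if_neg hvK] at hstepA
        rw [if_neg (by tauto), if_neg (by tauto)] at hstepB
        rw [hstepA, hstepB]
        obtain ⟨hi', t', cnt', missing', ha, hb, h1, h2, h3, h4⟩ :=
          ih (hi + 1) t cnt missing (by omega) (by omega) hSim'
        exact ⟨hi', t', cnt', missing', ha, hb, by omega, h2, h3, h4⟩
    · -- both loops exit
      refine ⟨hi, t, cnt, missing,
        aInner_exit _ _ _ _ _ _ (fun h => hc ⟨h.1, hca.mp h.2⟩),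
        bInner_exit _ _ _ _ _ _ hc,
        le_rfl, hhi, ⟨hTree, hmiss, hwin, hlohi⟩, ?_⟩
      by_cases hlt : (hi : Int) < N
      · left
        have : ¬ missing > 0 := fun h => hc ⟨hlt, h⟩
        have : 0 ≤ missing := by rw [hmiss]; exact Int.natCast_nonneg _
        omega
      · right; omega

lemma aStep_eval (N K : Int) (A : List Int) (n : Nat) (t : Array Int) (rt res lt rt' : Int)
    (t' : Array Int) (hpr : aInner N K A n rt t = (rt', t')) :
    aStep N K A n (t, rt, res) lt =
      ((if PySem.List.pyGetD A lt 0 ≤ K then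
          stSet n t' (PySem.List.pyGetD A lt 0 - 1)
            (stQuery n t' (PySem.List.pyGetD A lt 0 - 1) (PySem.List.pyGetD A lt 0) - 1)
        else t'), rt',
       (if tget t' 1 ≠ 0 then min res (rt' - lt) else res)) := by
  unfold aStep
  simp only []
  rw [hpr]

lemma bStep_eval (N K : Int) (A : List Int) (cnt : PySem.Dict Int Int)
    (missing rt res lt rt' : Int) (cnt' : PySem.Dict Int Int) (missing' : Int)
    (hpr : bInner N K A rt cnt missing = (rt', cnt', missing')) :
    bStep N K A (cnt, missing, rt, res) lt =
      (if 1 ≤ PySem.List.pyGetD A lt 0 ∧ PySem.List.pyGetD A lt 0 ≤ K then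
        (cnt'.insert (PySem.List.pyGetD A lt 0) (cnt'.getD (PySem.List.pyGetD A lt 0) 0 - 1),
         (if cnt'.getD (PySem.List.pyGetD A lt 0) 0 - 1 = 0 then missing' + 1 else missing'),
         rt', (if missing' = 0 then min res (rt' - lt) else res))
      else (cnt', missing', rt',
         (if missing' = 0 then min res (rt' - lt) else res))) := by
  unfold bStep
  simp only []
  rw [hpr]

lemma outer_sim (N K : Int) (A : List Int) (H n Kn : Nat)
    (hn : n = 2 ^ H) (hKn : Kn = K.toNat) (hK0 : 0 ≤ K) (hKle : Kn ≤ n)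
    (hn31 : n ≤ 2 ^ 31) (hN31 : N ≤ 2147483648) (hN0 : 0 < N)
    (hNlen : N ≤ (A.length : Int))
    (hpre : ∀ x ∈ A.take N.toNat, 1 ≤ x) :
    ∀ (m lo : Nat) (t : Array Int) (cnt : PySem.Dict Int Int) (missing : Int)
      (hi : Nat) (res : Int),
      lo + m = N.toNat → hi ≤ N.toNat →
      SimInv K A n Kn lo hi t cnt missing →
      (((List.range' lo m).map (fun (k : Nat) => (k : Int))).foldl (aStep N K A n)
          (t, (hi : Int), res)).2.2
      = (((List.range' lo m).map (fun (k : Nat) => (k : Int))).foldl (bStep N K A)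
          (cnt, missing, (hi : Int), res)).2.2.2 := by
  intro m
  induction m with
  | zero => intros; rfl
  | succ m ih =>
    intro lo t cnt missing hi res hlom hhi hSim
    obtain ⟨hi', t', cnt', missing', ha, hb, h1, h2, hSim', h4⟩ :=
      inner_sim N K A H n Kn lo hn hKn hK0 hKle hn31 hN31 hN0 hNlen hpre
        (N.toNat - hi) hi t cnt missing le_rfl hhi hSim
    obtain ⟨hTree', hmiss', hwin', hlohi'⟩ := hSim'
    have hloN : lo < N.toNat := by omega
    have hlolen : lo < A.length := by omega
    have hhilen' : hi' ≤ A.length := by omega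
    rw [List.range'_succ, List.map_cons, List.foldl_cons, List.foldl_cons,
        aStep_eval N K A n t _ res _ _ t' ha,
        bStep_eval N K A cnt missing _ res _ _ cnt' missing' hb]
    set v := PySem.List.pyGetD A (lo : Int) 0 with hvdef
    have hvA : v = A[lo] := by
      rw [hvdef, PySem.List.pyGetD_natCast, List.getD_eq_getElem _ _ hlolen]
    have hv1 : 1 ≤ v := by
      rw [hvA]
      exact hpre _ (by
        have : A[lo] = (A.take N.toNat)[lo]'(by simp; omega) := (List.getElem_take).symm
        rw [this]
        exact List.getElem_mem _)
    -- missing' is a count, hence nonnegative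
    have hm0 : 0 ≤ missing' := by rw [hmiss']; exact Int.natCast_nonneg _
    -- the two res updates agree
    have hcond' := cond_equiv K A H n Kn lo hi' t' cnt' missing' hn hKn hK0 hKle
      ⟨hTree', hmiss', hwin', hlohi'⟩
    have hres : (if tget t' 1 ≠ 0 then min res ((hi' : Int) - (lo : Int)) else res)
        = (if missing' = 0 then min res ((hi' : Int) - (lo : Int)) else res) := by
      by_cases hmz : missing' = 0
      · have hne : tget t' 1 ≠ 0 := fun h => by have := hcond'.mp h; omega
        rw [if_pos hmz, if_pos hne]
      · have hne : ¬ (tget t' 1 ≠ 0) := fun h => h (hcond'.mpr (by omega))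
        rw [if_neg hmz, if_neg hne]
    rw [hres]
    -- when some tracked value exists, the window is nonempty
    have hlt : 1 ≤ Kn → lo < hi' := by
      intro hKn1
      rcases h4 with h0 | hNend
      · have hz : ¬ 0 < zCount Kn cnt' := by rw [hmiss'] at h0; omega
        rw [zCount_pos_iff] at hz
        push Not at hz
        have h1' := hz 0 (by omega)
        have hw := hwin' 1 le_rfl (by omega)
        rw [show ((0 : Nat) : Int) + 1 = 1 from rfl] at h1'
        rw [hw] at h1'
        have := winCount_le A lo hi' 1
        have : 1 ≤ winCount A lo hi' 1 := by omega
        omega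
      · omega
    by_cases hvK : v ≤ K
    · -- decrement a tracked value
      have hKn1 : 1 ≤ Kn := by omega
      have hlthi : lo < hi' := hlt hKn1
      set i0 := (v - 1).toNat with hi0def
      have hi0K : i0 < Kn := by omega
      have hvi0 : v - 1 = (i0 : Int) := by omega
      have hvi01 : v = ((i0 : Nat) : Int) + 1 := by omega
      set c := cnt'.getD v 0 with hcdef
      have hcw : c = (winCount A lo hi' v : Int) := hwin' v hv1 hvK
      have hcpos : 1 ≤ c := by
        rcases h4 with h0 | hNend
        · have hz : ¬ 0 < zCount Kn cnt' := by rw [hmiss'] at h0; omega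
          rw [zCount_pos_iff] at hz
          push Not at hz
          have := hz i0 hi0K
          rw [← hvi01, ← hcdef] at this
          have hnn : 0 ≤ c := by rw [hcw]; exact Int.natCast_nonneg _
          omega
        · have hshift := winCount_shift A lo hi' v hlthi hhilen'
          rw [if_pos hvA.symm] at hshift
          rw [hcw, hshift]
          push_cast
          omega
      have hcbound : c ≤ pvIE := by
        have hb1 := winCount_le A lo hi' v
        have hb2 := pvIE_big
        omega
      have hleafval : t'.getD (n + i0) 0 = c := by
        rw [hTree'.2 (n + i0) (by omega) (by omega),
            nodeVal_leaf _ _ _ (by omega) (by omega)]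
        unfold leafOf
        rw [Nat.add_sub_cancel_left, if_pos hi0K, ← hvi01]
      have hquery : stQuery n t' (v - 1) v = c := by
        rw [hvi0, hvi01, stQuery_leaf n t' i0 (by rw [hleafval]; exact hcbound)]
        exact hleafval
      have hSim'' : SimInv K A n Kn (lo + 1) hi'
          (stSet n t' (v - 1) (c - 1)) (cnt'.insert v (c - 1))
          (if c - 1 = 0 then missing' + 1 else missing') := by
        refine ⟨?_, ?_, ?_, fun _ => by omega⟩
        · rw [leafOf_insert Kn cnt' v (c - 1) hv1 (by omega), ← hi0def, hvi0]
          exact stSet_inv n _ t' i0 (c - 1) hTree' (by omega) (by omega)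
        · have hz := zCount_insert Kn cnt' v (c - 1) hv1 (by omega)
          rw [← hcdef] at hz
          rw [if_neg (show ¬ (c = 0) from by omega)] at hz
          rw [hmiss']
          split_ifs with h0
          · rw [if_pos h0] at hz; omega
          · rw [if_neg h0] at hz; omega
        · intro w hw1 hwK
          rw [PySem.Dict.getD_insert]
          have hshift := winCount_shift A lo hi' w hlthi hhilen'
          by_cases hwv : w = v
          · rw [if_pos hwv, hwv]
            rw [hwv] at hshift
            rw [if_pos hvA.symm] at hshift
            have := hwin' v hv1 hvK
            rw [← hcdef] at this
            rw [hshift] at this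
            push_cast at this
            omega
          · rw [if_neg hwv]
            rw [if_neg (show ¬ A[lo] = w from fun h => by omega)] at hshift
            rw [hwin' w hw1 hwK, hshift]
            push_cast
            ring
      have hcondv : 1 ≤ v ∧ v ≤ K := ⟨hv1, hvK⟩
      rw [if_pos hvK, hquery, if_pos hcondv]
      exact ih (lo + 1) _ _ _ _ _ (by omega) h2 hSim''
    · -- the removed element is untracked: states unchanged
      have hSim'' : SimInv K A n Kn (lo + 1) hi' t' cnt' missing' := by
        refine ⟨hTree', hmiss', ?_, fun hKn1 => by have := hlt hKn1; omega⟩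
        intro w hw1 hwK
        have hKn1 : 1 ≤ Kn := by omega
        have hshift := winCount_shift A lo hi' w (hlt hKn1) hhilen'
        rw [if_neg (show ¬ A[lo] = w from fun h => by omega)] at hshift
        rw [hwin' w hw1 hwK, hshift]
        push_cast
        ring
      rw [if_neg hvK, if_neg (show ¬ (1 ≤ v ∧ v ≤ K) from fun h => hvK h.2)]
      exact ih (lo + 1) _ _ _ _ _ (by omega) h2 hSim''

-- ===== VERDICT (by name: the statement is the Claim_ definition above) =====
theorem find_smallest_subarray_size_spec : Claim_equal_find_smallest_subarray_size := by
  intro N K A hdom hpre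
  unfold Pre_find_smallest_subarray_size at hpre
  obtain ⟨hNlen, hK0, hmem⟩ := hpre
  unfold Spec_find_smallest_subarray_size
  by_cases hN : 0 < N
  · have hdom' : N ≤ 2147483648 ∧ K ≤ 2147483648 := by
      unfold Dom_find_smallest_subarray_size at hdom
      simp only [Bool.and_eq_true, pvDomInt, decide_eq_true_eq] at hdom
      exact ⟨hdom.1.1.2, hdom.1.2.2⟩
    obtain ⟨hfst, hKle0, hTree0⟩ := stInit_spec K hK0
    set H := PySem.Int.bitLength ((K.toNat : Int) - 1) with hHdef
    set n := (stInit K).1 with hndef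
    have hn : n = 2 ^ H := hfst
    have hH31 : H ≤ 31 := by
      rcases eq_or_ne ((K.toNat : Int) - 1) 0 with h0 | hne
      · rw [hHdef, h0, PySem.Int.bitLength_zero]
        omega
      · have hle := PySem.Int.two_pow_bitLength_le _ hne
        rw [← hHdef] at hle
        have habs : ((K.toNat : Int) - 1).natAbs ≤ 2 ^ 31 - 1 := by
          have : K ≤ 2147483648 := hdom'.2
          omega
        by_contra hcon
        have hge : (2 : Nat) ^ 31 ≤ 2 ^ (H - 1) :=
          Nat.pow_le_pow_right (by norm_num) (by omega)
        omega
    have hn31 : n ≤ 2 ^ 31 := by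
      rw [hn]; exact Nat.pow_le_pow_right (by norm_num) hH31
    have hzempty : zCount K.toNat PySem.Dict.empty = K.toNat := by
      unfold zCount
      rw [List.countP_eq_length.mpr (fun a ha => by simp [PySem.Dict.getD_empty]),
          List.length_range]
    have hSim0 : SimInv K A n K.toNat 0 0 (stInit K).2 PySem.Dict.empty K := by
      refine ⟨hTree0, ?_, ?_, fun _ => le_rfl⟩
      · rw [hzempty]; omega
      · intro w h1 h2
        rw [PySem.Dict.getD_empty, winCount_zero]
        simp
    have houter := outer_sim N K A H n K.toNat hn rfl hK0 hKle0 hn31 hdom'.1 hN hNlen hmem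
      N.toNat 0 (stInit K).2 PySem.Dict.empty K 0 (N + 1) (by omega) (by omega) hSim0
    simp only [Nat.cast_zero] at houter
    have hrange : PySem.List.pyRange 0 N 1 =
        (List.range' 0 N.toNat).map (fun (k : Nat) => (k : Int)) := by
      rw [PySem.List.pyRange_one]
      simp [List.range_eq_range']
    unfold find_smallest_subarray_size find_smallest_subarray_size_alt
    simp only []
    rw [hrange, ← hndef, houter]
  · have hnil : PySem.List.pyRange 0 N 1 = [] :=
      PySem.List.pyRange_one_eq_nil (by omega)
    unfold find_smallest_subarray_size find_smallest_subarray_size_alt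
    simp only [hnil, List.foldl_nil]
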